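-- pv_equiv track=rewrite | github.com/strNophix/advent-of-code | aoc2023/solutions/day6.py | find_beat_count
-- ===== SOURCE A (Python) =====
-- def find_beat_count(time: int, record: int) -> int:
--     result = 0
--     mid = time // 2
--
--     # TODO: implement binary search to find left and right bound.
--     point = mid
--     while (time - point) * point > record and point > 0:
--         point -= 1
--         result += 1
--
--     point = mid + 1
--     while (time - point) * point > record and point < time:
--         point += 1
--         result += 1
--
--     return result
-- ===== SOURCE B (Python) =====
-- def _isqrt(n):
--     # floor integer square root for n >= 0, by the classic shift-by-2 recursion
--     if n == 0:
--         return 0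
--     r = 2 * _isqrt(n // 4)
--     return r + 1 if (r + 1) * (r + 1) <= n else r
--
--
-- def find_beat_count(time: int, record: int) -> int:
--     # hold p beats iff (time-p)*p > record iff (time-2p)^2 < time^2-4*record
--     if time <= 0:
--         return 0
--     d = time * time - 4 * record
--     if d <= 0:
--         return 0
--     s = _isqrt(d - 1)  # largest m >= 0 with m*m < d
--     lo = (time - s + 1) // 2
--     if lo < 1:
--         lo = 1
--     hi = (time + s) // 2
--     if hi > time - 1:
--         hi = time - 1
--     return hi - lo + 1 if hi >= lo else 0
-- ===== Notes on version B (the rewrite author's own statement) =====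
-- stated objective: faster
-- what changed: Replaces A's two linear scans outward from time//2 with a closed-form solution of the quadratic (time-p)*p > record: an integer square root gives the beating interval's bounds directly, clamped to [1, time-1].
import Mathlib
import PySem

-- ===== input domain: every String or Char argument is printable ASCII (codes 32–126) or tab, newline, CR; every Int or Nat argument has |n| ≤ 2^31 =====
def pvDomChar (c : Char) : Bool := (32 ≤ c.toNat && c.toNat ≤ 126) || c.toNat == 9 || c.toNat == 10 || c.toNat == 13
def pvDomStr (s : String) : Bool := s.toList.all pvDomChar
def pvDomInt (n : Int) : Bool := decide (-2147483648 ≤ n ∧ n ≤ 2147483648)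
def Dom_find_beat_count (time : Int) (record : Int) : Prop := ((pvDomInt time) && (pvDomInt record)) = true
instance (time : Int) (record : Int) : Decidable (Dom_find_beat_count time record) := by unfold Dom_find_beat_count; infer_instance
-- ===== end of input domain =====

-- B replaces A's two linear scans with a closed-form quadratic-formula count via an integer square root (asymptotically faster).

-- ===== PORT A =====
-- first while loop: point steps down from time//2 while it beats the record and point > 0
def fbcLoopDown (time record : Int) (point result : Int) : Int :=
  if (time - point) * point > record ∧ point > 0 then
    fbcLoopDown time record (point - 1) (result + 1)
  else result
termination_by point.toNat
decreasing_by omega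

-- second while loop: point steps up from time//2 + 1 while it beats the record and point < time
def fbcLoopUp (time record : Int) (point result : Int) : Int :=
  if (time - point) * point > record ∧ point < time then
    fbcLoopUp time record (point + 1) (result + 1)
  else result
termination_by (time - point).toNat
decreasing_by omega

def find_beat_count (time : Int) (record : Int) : Int :=
  let mid := PySem.Int.floordiv time 2
  let result := fbcLoopDown time record mid 0
  fbcLoopUp time record (mid + 1) result

-- ===== PORT B =====
-- floor integer square root for n >= 0, by the classic shift-by-2 recursion (Source B's _isqrt)
def fbcIsqrt (n : Int) : Int :=
  if n ≤ 0 then 0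
  else
    let r := 2 * fbcIsqrt (PySem.Int.floordiv n 4)
    if (r + 1) * (r + 1) ≤ n then r + 1 else r
termination_by n.toNat
decreasing_by
  simp only [PySem.Int.floordiv]
  rw [Int.fdiv_eq_ediv]
  simp only [show ((0:Int) ≤ 4 ∨ (4:Int) ∣ n) = True from by simp, if_true]
  omega

def find_beat_count_alt (time : Int) (record : Int) : Int :=
  if time ≤ 0 then 0
  else
    let d := time * time - 4 * record
    if d ≤ 0 then 0
    else
      let s := fbcIsqrt (d - 1)
      let lo := PySem.Int.floordiv (time - s + 1) 2
      let lo := if lo < 1 then 1 else lo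
      let hi := PySem.Int.floordiv (time + s) 2
      let hi := if hi > time - 1 then time - 1 else hi
      if hi ≥ lo then hi - lo + 1 else 0

-- ===== PRECONDITION & SPEC =====
def Spec_find_beat_count (time : Int) (record : Int) (out : Int) : Prop := out = find_beat_count_alt time record
instance (time : Int) (record : Int) (out : Int) : Decidable (Spec_find_beat_count time record out) := by unfold Spec_find_beat_count; infer_instance

-- ===== CLAIM (what is proved, stated in full; the proofs are below) =====
def Claim_equal_find_beat_count : Prop := ∀ (time : Int) (record : Int), Dom_find_beat_count time record → Spec_find_beat_count time record (find_beat_count time record)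

-- ===== LEMMAS AND PROOFS =====

theorem fbc_floordiv_two (a : Int) : PySem.Int.floordiv a 2 = a / 2 := by
  simp [PySem.Int.floordiv, Int.fdiv_eq_ediv]

theorem fbc_floordiv_four (a : Int) : PySem.Int.floordiv a 4 = a / 4 := by
  simp [PySem.Int.floordiv, Int.fdiv_eq_ediv]

theorem fbcIsqrt_spec : ∀ (n : Int), 0 ≤ n →
    0 ≤ fbcIsqrt n ∧ fbcIsqrt n * fbcIsqrt n ≤ n ∧ n < (fbcIsqrt n + 1) * (fbcIsqrt n + 1) := by
  intro n
  induction n using fbcIsqrt.induct with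
  | case1 n h => intro hn; rw [fbcIsqrt, if_pos h]; omega
  | case2 n h r hc ih =>
    intro hn
    have hq : 0 ≤ PySem.Int.floordiv n 4 := by rw [fbc_floordiv_four]; omega
    obtain ⟨ih0, ih1, ih2⟩ := ih hq
    rw [fbc_floordiv_four] at ih0 ih1 ih2
    rw [fbcIsqrt, if_neg h, fbc_floordiv_four]
    have h4 : 4 * (n / 4) ≤ n ∧ n < 4 * (n / 4) + 4 := by omega
    set m := fbcIsqrt (n / 4) with hm
    by_cases hcond : (2 * m + 1) * (2 * m + 1) ≤ n
    · simp only [if_pos hcond]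
      exact ⟨by omega, by nlinarith, by nlinarith⟩
    · simp only [if_neg hcond]
      exact ⟨by omega, by nlinarith, by nlinarith⟩
  | case3 n h r hc ih =>
    intro hn
    have hq : 0 ≤ PySem.Int.floordiv n 4 := by rw [fbc_floordiv_four]; omega
    obtain ⟨ih0, ih1, ih2⟩ := ih hq
    rw [fbc_floordiv_four] at ih0 ih1 ih2
    rw [fbcIsqrt, if_neg h, fbc_floordiv_four]
    have h4 : 4 * (n / 4) ≤ n ∧ n < 4 * (n / 4) + 4 := by omega
    set m := fbcIsqrt (n / 4) with hm
    by_cases hcond : (2 * m + 1) * (2 * m + 1) ≤ n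
    · simp only [if_pos hcond]
      exact ⟨by omega, by nlinarith, by nlinarith⟩
    · simp only [if_neg hcond]
      exact ⟨by omega, by nlinarith, by nlinarith⟩

theorem fbc_beat_iff (t r p s : Int) (hs0 : 0 ≤ s) (h1 : s * s ≤ t * t - 4 * r - 1)
    (h2 : t * t - 4 * r - 1 < (s + 1) * (s + 1)) :
    (t - p) * p > r ↔ (-s ≤ t - 2 * p ∧ t - 2 * p ≤ s) := by
  have key : (t - 2 * p) * (t - 2 * p) = t * t - 4 * ((t - p) * p) := by ring
  constructor
  · intro hb
    constructor
    · nlinarith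
    · nlinarith
  · intro ⟨ha, hb⟩
    nlinarith

theorem fbcLoopDown_eq (t r Lb Hb : Int)
    (hchar : ∀ p : Int, (t - p) * p > r ↔ (Lb ≤ p ∧ p ≤ Hb)) :
    ∀ (point result : Int),
      fbcLoopDown t r point result =
        result + (if Lb ≤ point ∧ point ≤ Hb ∧ 1 ≤ point then point - max Lb 1 + 1 else 0) := by
  intro point result
  induction point, result using fbcLoopDown.induct t r with
  | case1 point result hg ih =>
    rw [fbcLoopDown, if_pos hg, ih]
    have hc := (hchar point).mp hg.1
    have hp := hg.2
    split_ifs <;> omega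
  | case2 point result hg =>
    rw [fbcLoopDown, if_neg hg]
    have : ¬ (Lb ≤ point ∧ point ≤ Hb ∧ 1 ≤ point) := by
      intro ⟨h1, h2, h3⟩
      exact hg ⟨(hchar point).mpr ⟨h1, h2⟩, by omega⟩
    rw [if_neg this]
    omega

theorem fbcLoopUp_eq (t r Lb Hb : Int)
    (hchar : ∀ p : Int, (t - p) * p > r ↔ (Lb ≤ p ∧ p ≤ Hb)) :
    ∀ (point result : Int),
      fbcLoopUp t r point result =
        result + (if Lb ≤ point ∧ point ≤ Hb ∧ point ≤ t - 1 then min Hb (t - 1) - point + 1 else 0) := by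
  intro point result
  induction point, result using fbcLoopUp.induct t r with
  | case1 point result hg ih =>
    rw [fbcLoopUp, if_pos hg, ih]
    have hc := (hchar point).mp hg.1
    have hp := hg.2
    split_ifs <;> omega
  | case2 point result hg =>
    rw [fbcLoopUp, if_neg hg]
    have : ¬ (Lb ≤ point ∧ point ≤ Hb ∧ point ≤ t - 1) := by
      intro ⟨h1, h2, h3⟩
      exact hg ⟨(hchar point).mpr ⟨h1, h2⟩, by omega⟩
    rw [if_neg this]
    omega

-- ===== VERDICT (by name: the statement is the Claim_ definition above) =====
theorem find_beat_count_spec : Claim_equal_find_beat_count := by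
  intro t r _
  unfold Spec_find_beat_count
  have hA : find_beat_count t r = fbcLoopUp t r (t / 2 + 1) (fbcLoopDown t r (t / 2) 0) := by
    rw [find_beat_count, fbc_floordiv_two]
  by_cases ht : t ≤ 0
  · have hdown : fbcLoopDown t r (t / 2) 0 = 0 := by
      rw [fbcLoopDown, if_neg]; intro ⟨_, h2⟩; omega
    have hup : fbcLoopUp t r (t / 2 + 1) 0 = 0 := by
      rw [fbcLoopUp, if_neg]; intro ⟨_, h2⟩; omega
    rw [hA, hdown, hup, find_beat_count_alt, if_pos ht]
  · by_cases hd : t * t - 4 * r ≤ 0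
    · have hnb : ∀ p : Int, ¬ ((t - p) * p > r) := by
        intro p hb; nlinarith [sq_nonneg (t - 2 * p)]
      have hdown : fbcLoopDown t r (t / 2) 0 = 0 := by
        rw [fbcLoopDown, if_neg]; intro hh; exact hnb _ hh.1
      have hup : fbcLoopUp t r (t / 2 + 1) 0 = 0 := by
        rw [fbcLoopUp, if_neg]; intro hh; exact hnb _ hh.1
      rw [hA, hdown, hup, find_beat_count_alt, if_neg ht]
      simp only [if_pos hd]
    · obtain ⟨hs0, hs1, hs2⟩ := fbcIsqrt_spec (t * t - 4 * r - 1) (by omega)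
      set s := fbcIsqrt (t * t - 4 * r - 1) with hsdef
      have hchar : ∀ p : Int, (t - p) * p > r ↔ ((t - s + 1) / 2 ≤ p ∧ p ≤ (t + s) / 2) := by
        intro p
        rw [fbc_beat_iff t r p s hs0 (by linarith) (by linarith)]
        omega
      rw [hA, fbcLoopDown_eq t r ((t - s + 1) / 2) ((t + s) / 2) hchar,
        fbcLoopUp_eq t r ((t - s + 1) / 2) ((t + s) / 2) hchar,
        find_beat_count_alt, if_neg ht]
      simp only [if_neg hd, fbc_floordiv_two, ← hsdef]
      split_ifs <;> omega
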